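-- pv_equiv track=rewrite | github.com/getsentry/taskbroker | flatten_use_imports.py | has_nested_brace
-- ===== SOURCE A (Python) =====
-- def has_nested_brace(rest: str) -> bool:
--     """True if use tree has { ... { ... } ... }"""
--     depth = 0
--     da = 0
--     for c in rest:
--         if c == "<":
--             da += 1
--         elif c == ">" and da > 0:
--             da -= 1
--         elif da == 0:
--             if c == "{":
--                 depth += 1
--                 if depth >= 2:
--                     return True
--             elif c == "}":
--                 depth -= 1
--     return False
-- ===== SOURCE B (Python) =====
-- def has_nested_brace(rest: str) -> bool:
--     """True if use tree has { ... { ... } ... }"""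
--     # Pass 1: collect the brace characters that occur outside angle brackets.
--     braces = []
--     da = 0
--     for c in rest:
--         if da == 0:
--             if c in "{}":
--                 braces.append(c)
--             elif c == "<":
--                 da = 1
--         elif c == "<":
--             da += 1
--         elif c == ">":
--             da -= 1
--     # Pass 2: running-depth scan of the brace sequence, looking for depth 2.
--     depth = 0
--     for b in braces:
--         depth += 1 if b == "{" else -1
--         if depth >= 2:
--             return True
--     return False
-- ===== Notes on version B (the rewrite author's own statement) =====
-- stated objective: alternative
-- what changed: Replaces A's fused single loop (angle-depth gating and brace-depth counting together, with early return) by two separate passes: first collect only the brace characters occurring outside angle brackets, then a running-depth scan of that brace sequence for depth 2.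
import Mathlib
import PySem

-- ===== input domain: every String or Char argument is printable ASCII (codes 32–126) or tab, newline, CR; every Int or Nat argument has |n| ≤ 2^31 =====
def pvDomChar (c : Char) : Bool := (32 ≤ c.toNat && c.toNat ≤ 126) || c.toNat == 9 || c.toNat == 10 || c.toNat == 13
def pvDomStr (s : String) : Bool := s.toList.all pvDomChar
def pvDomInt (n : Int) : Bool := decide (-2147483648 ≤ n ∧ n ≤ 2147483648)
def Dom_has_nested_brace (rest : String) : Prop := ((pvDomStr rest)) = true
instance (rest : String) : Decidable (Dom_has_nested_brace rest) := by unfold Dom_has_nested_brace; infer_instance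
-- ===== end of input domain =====

-- B replaces A's fused angle-gated counting loop by two passes (collect the braces outside angles, then a running-depth scan); alternative decomposition, same cost.

-- ===== PORT A =====
-- A's single loop over the characters, state (depth, da), early return on depth ≥ 2.
def hnbA : List Char → Int → Int → Bool
  | [], _, _ => false
  | c :: cs, depth, da =>
    if c = '<' then hnbA cs depth (da + 1)
    else if c = '>' ∧ da > 0 then hnbA cs depth (da - 1)
    else if da = 0 then
      if c = '{' then
        if depth + 1 ≥ 2 then true else hnbA cs (depth + 1) da
      else if c = '}' then hnbA cs (depth - 1) da
      else hnbA cs depth da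
    else hnbA cs depth da

def has_nested_brace (rest : String) : Bool := hnbA rest.toList 0 0

-- ===== PORT B =====
-- Pass 1: collect the brace characters that occur outside angle brackets.
-- ('c in "{}"' is ported as the disjunction c = '{' ∨ c = '}', exact for single chars.)
def hnbCollect : List Char → Int → List Char
  | [], _ => []
  | c :: cs, da =>
    if da = 0 then
      if c = '{' ∨ c = '}' then c :: hnbCollect cs da
      else if c = '<' then hnbCollect cs 1
      else hnbCollect cs da
    else if c = '<' then hnbCollect cs (da + 1)
    else if c = '>' then hnbCollect cs (da - 1)
    else hnbCollect cs da

-- Pass 2: running-depth scan of the brace sequence, looking for depth 2.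
def hnbScan : List Char → Int → Bool
  | [], _ => false
  | b :: bs, depth =>
    let d := depth + (if b = '{' then 1 else -1)
    if d ≥ 2 then true else hnbScan bs d

def has_nested_brace_alt (rest : String) : Bool := hnbScan (hnbCollect rest.toList 0) 0

-- ===== PRECONDITION & SPEC =====
def Spec_has_nested_brace (rest : String) (out : Bool) : Prop := out = has_nested_brace_alt rest
instance (rest : String) (out : Bool) : Decidable (Spec_has_nested_brace rest out) := by unfold Spec_has_nested_brace; infer_instance

-- ===== CLAIM (what is proved, stated in full; the proofs are below) =====
def Claim_equal_has_nested_brace : Prop := ∀ (rest : String), Dom_has_nested_brace rest → Spec_has_nested_brace rest (has_nested_brace rest)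

-- ===== LEMMAS AND PROOFS =====
-- Invariant: on reachable states (brace depth ≤ 1, angle depth ≥ 0) the fused loop
-- equals the scan of the collected braces.
theorem hnbA_eq_scan_collect (cs : List Char) : ∀ (depth da : Int), depth ≤ 1 → 0 ≤ da →
    hnbA cs depth da = hnbScan (hnbCollect cs da) depth := by
  induction cs with
  | nil => intro depth da _ _; rfl
  | cons c cs ih =>
    intro depth da hd hda
    by_cases h0 : da = 0
    · subst h0
      by_cases h1 : c = '<'
      · subst h1
        simpa [hnbA, hnbCollect] using ih depth 1 hd (by norm_num)
      · by_cases h2 : c = '{'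
        · subst h2
          by_cases h3 : depth + 1 ≥ 2
          · simp [hnbA, hnbCollect, hnbScan, h3]
          · simp [hnbA, hnbCollect, hnbScan, h3, ih (depth + 1) 0 (by omega) le_rfl]
        · by_cases h4 : c = '}'
          · subst h4
            have e : depth + (-1 : Int) = depth - 1 := by ring
            have h5 : ¬ (depth - 1 ≥ 2) := by omega
            simp [hnbA, hnbCollect, hnbScan, e, h5, ih (depth - 1) 0 (by omega) le_rfl]
          · simp [hnbA, hnbCollect, h1, h2, h4, ih depth 0 hd le_rfl]
    · have hpos : 0 < da := lt_of_le_of_ne hda (Ne.symm h0)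
      by_cases h1 : c = '<'
      · subst h1
        simpa [hnbA, hnbCollect, h0] using ih depth (da + 1) hd (by omega)
      · by_cases h2 : c = '>'
        · subst h2
          simpa [hnbA, hnbCollect, hpos, h0] using ih depth (da - 1) hd (by omega)
        · simp [hnbA, hnbCollect, h0, h1, h2, ih depth da hd hda]

-- ===== VERDICT (by name: the statement is the Claim_ definition above) =====
theorem has_nested_brace_spec : Claim_equal_has_nested_brace := by
  intro rest _
  unfold Spec_has_nested_brace has_nested_brace has_nested_brace_alt
  exact hnbA_eq_scan_collect rest.toList 0 0 (by norm_num) (by norm_num)
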